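-- pv_equiv track=rewrite | github.com/menaaziz27/my-python-scripts | 01-problem solving/HackerRank/loops/consecutive_combo.py | consecutive_combo
-- ===== SOURCE A (Python) =====
-- def consecutive_combo(lst1,lst2):
--     flag = False
--     count = 0
--     lst3 = sorted((lst1+lst2))
--     for i in range(1,len(lst3)):
--         if lst3[i] - lst3[i - 1] == 1:
--             count += 1
--     if count == len(lst3) - 1:
--         return True
--     else:
--         return False
-- ===== SOURCE B (Python) =====
-- def consecutive_combo(lst1, lst2):
--     combined = lst1 + lst2
--     s = set(combined)
--     return len(combined) > 0 and len(s) == len(combined) \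
--         and max(s) - min(s) + 1 == len(combined)
-- ===== Notes on version B (the rewrite author's own statement) =====
-- stated objective: simpler
-- what changed: Replaces sort-then-count-adjacent-gaps with a set plus min/max: consecutive iff no duplicates and max-min+1 equals the total length.
import Mathlib
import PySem

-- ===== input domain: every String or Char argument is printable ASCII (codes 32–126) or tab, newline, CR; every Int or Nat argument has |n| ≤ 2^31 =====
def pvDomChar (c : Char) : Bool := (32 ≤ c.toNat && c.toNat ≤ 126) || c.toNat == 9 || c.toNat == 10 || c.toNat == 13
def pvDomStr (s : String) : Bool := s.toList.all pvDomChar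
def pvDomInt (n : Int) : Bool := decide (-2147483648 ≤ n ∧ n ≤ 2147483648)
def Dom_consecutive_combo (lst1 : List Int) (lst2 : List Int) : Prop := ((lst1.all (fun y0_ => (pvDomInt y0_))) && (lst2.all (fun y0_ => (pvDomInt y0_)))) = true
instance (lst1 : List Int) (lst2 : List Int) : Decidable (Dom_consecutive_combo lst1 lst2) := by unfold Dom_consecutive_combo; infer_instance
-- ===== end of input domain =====

-- B replaces sort + adjacent-gap counting by a set with min/max (no duplicates and max-min+1 = length); simpler, no measured speed claim.


-- ===== PORT A =====
-- (A's local variable 'flag' is never used; it is dropped here.)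
def consecutive_combo (lst1 : List Int) (lst2 : List Int) : Bool :=
  let lst3 := PySem.List.sorted (lst1 ++ lst2) (fun x => x) false
  let count : Int :=
    (PySem.List.pyRange 1 (lst3.length : Int) 1).foldl
      (fun count i =>
        if PySem.List.pyGetD lst3 i 0 - PySem.List.pyGetD lst3 (i - 1) 0 == 1
        then count + 1 else count) 0
  if count == (lst3.length : Int) - 1 then true else false

-- ===== PORT B =====
def consecutive_combo_alt (lst1 : List Int) (lst2 : List Int) : Bool :=
  let combined := lst1 ++ lst2
  let s := PySem.Set.ofList combined
  decide (0 < combined.length) &&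
  (PySem.Set.len s == (combined.length : Int)) &&
  (match PySem.List.max? s (fun x => x), PySem.List.min? s (fun x => x) with
   | some mx, some mn => mx - mn + 1 == (combined.length : Int)
   | _, _ => false)

-- ===== PRECONDITION & SPEC =====
def Spec_consecutive_combo (lst1 : List Int) (lst2 : List Int) (out : Bool) : Prop := out = consecutive_combo_alt lst1 lst2
instance (lst1 : List Int) (lst2 : List Int) (out : Bool) : Decidable (Spec_consecutive_combo lst1 lst2 out) := by unfold Spec_consecutive_combo; infer_instance

-- ===== CLAIM (what is proved, stated in full; the proofs are below) =====
def Claim_equal_consecutive_combo : Prop := ∀ (lst1 : List Int) (lst2 : List Int), Dom_consecutive_combo lst1 lst2 → Spec_consecutive_combo lst1 lst2 (consecutive_combo lst1 lst2)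

-- ===== LEMMAS AND PROOFS =====

-- In a (·≤·)-pairwise list every element is at most the last one.
theorem pv_pairwise_le_getLast : ∀ (l : List Int) (hne : l ≠ []),
    l.Pairwise (· ≤ ·) → ∀ y ∈ l, y ≤ l.getLast hne := by
  intro l
  induction l with
  | nil => intro hne; exact absurd rfl hne
  | cons a t ih =>
    intro _ hp y hy
    rcases List.pairwise_cons.mp hp with ⟨ha, hpt⟩
    cases t with
    | nil => simp at hy; simp [hy]
    | cons b t' =>
      rw [List.getLast_cons (by simp)]
      rcases List.mem_cons.mp hy with rfl | hyt
      · exact le_trans (ha _ (List.getLast_mem _)) (le_refl _)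
      · exact ih (by simp) hpt y hyt

-- For a strictly increasing integer list, last ≥ head + (length-1), with equality
-- exactly when every step is +1.
theorem pv_chain_lt_getLast : ∀ (t : List Int) (h : Int),
    (h :: t).IsChain (· < ·) →
    (h + t.length ≤ (h :: t).getLast (by simp) ∧
      ((h :: t).getLast (by simp) = h + t.length →
        (h :: t).IsChain (fun a b => b = a + 1))) := by
  intro t
  induction t with
  | nil => intro h _; simp
  | cons b t' ih =>
    intro h hc
    rcases List.isChain_cons_cons.mp hc with ⟨hab, hbt⟩
    rcases ih b hbt with ⟨hle, heq⟩
    rw [List.getLast_cons (by simp)]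
    constructor
    · calc (h : Int) + (↑(b :: t').length) = h + t'.length + 1 := by push_cast [List.length_cons]; ring
        _ ≤ b + t'.length := by omega
        _ ≤ (b :: t').getLast (by simp) := hle
    · intro hlast
      have hb : b = h + 1 := by
        have : b + (t'.length : Int) ≤ h + (↑(b :: t').length) := hlast ▸ hle
        simp at this; omega
      have hlast' : (b :: t').getLast (by simp) = b + t'.length := by
        rw [hlast, hb]; push_cast [List.length_cons]; ring
      exact List.isChain_cons_cons.mpr ⟨hb, heq hlast'⟩

-- A +1-chain determines its last element.
theorem pv_chain_succ_getLast : ∀ (t : List Int) (h : Int),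
    (h :: t).IsChain (fun a b => b = a + 1) →
    (h :: t).getLast (by simp) = h + t.length := by
  intro t
  induction t with
  | nil => intro h _; simp
  | cons b t' ih =>
    intro h hc
    rcases List.isChain_cons_cons.mp hc with ⟨hb, hbt⟩
    rw [List.getLast_cons (by simp), ih b hbt, hb]
    push_cast [List.length_cons]; ring

-- Core order fact: for a (·≤·)-pairwise nonempty list, being a +1-chain is
-- equivalent to (nodup ∧ last - head + 1 = length).
theorem pv_consec_iff (m : Int) (t : List Int)
    (hp : (m :: t).Pairwise (· ≤ ·)) :
    (m :: t).IsChain (fun a b => b = a + 1) ↔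
      ((m :: t).Nodup ∧ (m :: t).getLast (by simp) - m + 1 = ((m :: t).length : Int)) := by
  constructor
  · intro hc
    have hlt : (m :: t).IsChain (· < ·) := hc.imp (fun hab => by omega)
    have hnd : (m :: t).Nodup := (List.IsChain.pairwise hlt).imp (fun hab => by omega)
    refine ⟨hnd, ?_⟩
    rw [pv_chain_succ_getLast t m hc]
    push_cast [List.length_cons]; ring
  · rintro ⟨hnd, hlen⟩
    have hplt : (m :: t).Pairwise (· < ·) :=
      (hp.and hnd).imp (fun hab => lt_of_le_of_ne hab.1 hab.2)
    have hc : (m :: t).IsChain (· < ·) := List.isChain_iff_pairwise.mpr hplt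
    rcases pv_chain_lt_getLast t m hc with ⟨_, heq⟩
    apply heq
    have : ((m :: t).length : Int) = (t.length : Int) + 1 := by simp
    omega

-- The length of set(c) equals the length of c exactly when c has no duplicates.
theorem pv_ofList_length_iff (c : List Int) :
    (PySem.Set.ofList c).length = c.length ↔ c.Nodup := by
  constructor
  · intro hlen
    have hfs : (PySem.Set.ofList c).toFinset = c.toFinset := by
      ext x; simp [List.mem_toFinset, PySem.Set.mem_ofList]
    have h1 : (PySem.Set.ofList c).toFinset.card = (PySem.Set.ofList c).length :=
      List.toFinset_card_of_nodup (PySem.Set.nodup_ofList c)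
    have h2 : c.toFinset.card = c.dedup.length := List.card_toFinset c
    have hdl : c.dedup.length = c.length := by rw [← h2, ← hfs, h1, hlen]
    have : c.dedup = c := (List.dedup_sublist c).eq_of_length hdl
    rw [← this]; exact c.nodup_dedup
  · intro hnd; rw [PySem.Set.ofList_eq_self_of_nodup c hnd]

-- Characterisation of port A: the sorted merge is a nonempty +1-chain.
theorem pv_A_iff (lst1 lst2 : List Int) :
    consecutive_combo lst1 lst2 = true ↔
      (lst1 ++ lst2 ≠ [] ∧
        (PySem.List.sorted (lst1 ++ lst2) (fun x => x) false).IsChain (fun a b => b = a + 1)) := by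
  simp only [consecutive_combo]
  set l := PySem.List.sorted (lst1 ++ lst2) (fun x => x) false with hl
  have hlen : l.length = (lst1 ++ lst2).length := PySem.List.length_sorted _ _ _
  rw [PySem.List.foldl_count_if]
  set p : Int → Bool := fun i =>
    PySem.List.pyGetD l i 0 - PySem.List.pyGetD l (i - 1) 0 == 1 with hp
  rcases Nat.eq_zero_or_pos l.length with h0 | hpos
  · have hnil : lst1 ++ lst2 = [] := by
      have := hlen ▸ h0; exact List.eq_nil_of_length_eq_zero this
    simp [h0]
    intro hno
    have hsplit := List.append_eq_nil_iff.mp hnil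
    exact absurd hsplit.2 (hno hsplit.1)
  · have hne : lst1 ++ lst2 ≠ [] := by
      intro h; rw [h, List.length_nil] at hlen; omega
    have hran : ((PySem.List.pyRange 1 (l.length : Int) 1).length : Int) = (l.length : Int) - 1 := by
      rw [PySem.List.length_pyRange_one]; omega
    constructor
    · intro htrue
      have hcount : (List.countP p (PySem.List.pyRange 1 (l.length : Int) 1) : Int)
          = (l.length : Int) - 1 := by
        by_contra hne'
        simp only [beq_iff_eq] at htrue
        rw [if_neg (by omega)] at htrue
        exact Bool.false_ne_true htrue
      refine ⟨hne, ?_⟩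
      have hall : ∀ i ∈ PySem.List.pyRange 1 (l.length : Int) 1, p i = true := by
        apply List.countP_eq_length.mp
        omega
      rw [List.isChain_iff_getElem]
      intro k hk
      have hmem : ((k : Int) + 1) ∈ PySem.List.pyRange 1 (l.length : Int) 1 := by
        rw [PySem.List.mem_pyRange_one]; omega
      have := hall _ hmem
      rw [hp] at this
      simp only [beq_iff_eq] at this
      rw [PySem.List.pyGetD_eq_getElem l 0 (by omega) (by omega),
          PySem.List.pyGetD_eq_getElem l 0 (by omega) (by omega)] at this
      have e1 : ((k : Int) + 1).toNat = k + 1 := by omega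
      have e2 : ((k : Int) + 1 - 1).toNat = k := by omega
      simp only [e1, e2] at this
      omega
    · rintro ⟨-, hchain⟩
      have hall : ∀ i ∈ PySem.List.pyRange 1 (l.length : Int) 1, p i = true := by
        intro i hi
        rw [PySem.List.mem_pyRange_one] at hi
        rw [hp]
        simp only [beq_iff_eq]
        rw [PySem.List.pyGetD_eq_getElem l 0 (by omega) (by omega),
            PySem.List.pyGetD_eq_getElem l 0 (by omega) (by omega)]
        have hk : (i - 1).toNat + 1 = i.toNat := by omega
        have := List.isChain_iff_getElem.mp hchain (i - 1).toNat (by omega)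
        simp only [hk] at this
        omega
      have hcount := List.countP_eq_length.mpr hall
      simp only [beq_iff_eq]
      rw [if_pos (by omega)]

-- Characterisation of port B, given the (always defined, for a nonempty input) max and min.
theorem pv_B_iff (lst1 lst2 : List Int) (mx mn : Int)
    (hne : lst1 ++ lst2 ≠ [])
    (hmx : PySem.List.max? (PySem.Set.ofList (lst1 ++ lst2)) (fun x => x) = some mx)
    (hmn : PySem.List.min? (PySem.Set.ofList (lst1 ++ lst2)) (fun x => x) = some mn) :
    consecutive_combo_alt lst1 lst2 = true ↔
      ((lst1 ++ lst2).Nodup ∧ mx - mn + 1 = ((lst1 ++ lst2).length : Int)) := by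
  simp only [consecutive_combo_alt, hmx, hmn, PySem.Set.len, Bool.and_eq_true,
    decide_eq_true_eq, beq_iff_eq]
  have hlen : 0 < (lst1 ++ lst2).length := List.length_pos_iff.mpr hne
  constructor
  · rintro ⟨⟨-, hcard⟩, hmm⟩
    exact ⟨(pv_ofList_length_iff _).mp (Int.natCast_inj.mp hcard), hmm⟩
  · rintro ⟨hnd, hmm⟩
    exact ⟨⟨hlen, Int.natCast_inj.mpr ((pv_ofList_length_iff _).mpr hnd)⟩, hmm⟩

-- B returns false on the empty input.
theorem pv_B_nil (lst1 lst2 : List Int) (h : lst1 ++ lst2 = []) :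
    consecutive_combo_alt lst1 lst2 = false := by
  simp only [consecutive_combo_alt, h]
  simp [PySem.Set.ofList, PySem.Set.empty]

-- ===== VERDICT (by name: the statement is the Claim_ definition above) =====
theorem consecutive_combo_spec : Claim_equal_consecutive_combo := by
  intro lst1 lst2 _
  unfold Spec_consecutive_combo
  by_cases hnil : lst1 ++ lst2 = []
  · rw [pv_B_nil lst1 lst2 hnil]
    rw [← Bool.not_eq_true]
    intro hA
    exact absurd ((pv_A_iff lst1 lst2).mp hA).1 (by simp [hnil])
  · -- the nonempty case
    have hsne : PySem.Set.ofList (lst1 ++ lst2) ≠ [] := by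
      rcases List.exists_mem_of_ne_nil _ hnil with ⟨x, hx⟩
      intro hempty
      exact absurd ((PySem.Set.mem_ofList _ x).mpr hx) (by simp [hempty])
    obtain ⟨mx, hmx⟩ : ∃ mx, PySem.List.max? (PySem.Set.ofList (lst1 ++ lst2)) (fun x => x) = some mx := by
      cases hmx : PySem.List.max? (PySem.Set.ofList (lst1 ++ lst2)) (fun x => x) with
      | none => exact absurd ((PySem.List.max?_eq_none_iff _ _).mp hmx) hsne
      | some v => exact ⟨v, rfl⟩
    obtain ⟨mn, hmn⟩ : ∃ mn, PySem.List.min? (PySem.Set.ofList (lst1 ++ lst2)) (fun x => x) = some mn := by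
      cases hmn : PySem.List.min? (PySem.Set.ofList (lst1 ++ lst2)) (fun x => x) with
      | none => exact absurd ((PySem.List.min?_eq_none_iff _ _).mp hmn) hsne
      | some v => exact ⟨v, rfl⟩
    have hBiff := pv_B_iff lst1 lst2 mx mn hnil hmx hmn
    have hAiff := pv_A_iff lst1 lst2
    -- facts about the sorted list
    have hperm := PySem.List.sorted_perm (lst1 ++ lst2) (fun x : Int => x) false
    have hpw := PySem.List.sorted_pairwise (lst1 ++ lst2) (fun x : Int => x)
    have hlen := PySem.List.length_sorted (lst1 ++ lst2) (fun x : Int => x) false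
    cases hl : PySem.List.sorted (lst1 ++ lst2) (fun x : Int => x) false with
    | nil => exact absurd ((PySem.List.sorted_eq_nil_iff _ _ _).mp hl) hnil
    | cons m t =>
      rw [hl] at hperm hpw hlen
      -- min = head of the sorted list
      have hmemc : ∀ y, y ∈ m :: t ↔ y ∈ lst1 ++ lst2 := fun y => hperm.mem_iff
      have hmins : ∀ y ∈ lst1 ++ lst2, mn ≤ y := by
        intro y hy
        exact PySem.List.min?_isMin hmn y ((PySem.Set.mem_ofList _ y).mpr hy)
      have hmnc : mn ∈ lst1 ++ lst2 := (PySem.Set.mem_ofList _ mn).mp (PySem.List.min?_mem hmn)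
      have hheadmin : ∀ y ∈ lst1 ++ lst2, m ≤ y := PySem.List.key_head_sorted_le _ _ hl
      have hmn_eq : mn = m :=
        le_antisymm (hmins m ((hmemc m).mp (List.mem_cons_self))) (hheadmin mn hmnc)
      -- max = last of the sorted list
      have hmaxs : ∀ y ∈ lst1 ++ lst2, y ≤ mx := by
        intro y hy
        exact PySem.List.max?_isMax hmx y ((PySem.Set.mem_ofList _ y).mpr hy)
      have hmxc : mx ∈ lst1 ++ lst2 := (PySem.Set.mem_ofList _ mx).mp (PySem.List.max?_mem hmx)
      have hlastle : ∀ y ∈ m :: t, y ≤ (m :: t).getLast (by simp) :=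
        pv_pairwise_le_getLast (m :: t) (by simp) hpw
      have hmx_eq : mx = (m :: t).getLast (by simp) :=
        le_antisymm (hlastle mx ((hmemc mx).mpr hmxc))
          (hmaxs _ ((hmemc _).mp (List.getLast_mem _)))
      -- put everything together
      have hcons := pv_consec_iff m t hpw
      have hnodup_iff : (m :: t).Nodup ↔ (lst1 ++ lst2).Nodup := hperm.nodup_iff
      rw [Bool.eq_iff_iff]
      rw [hAiff]
      rw [hBiff]
      rw [hl]
      rw [hcons]
      rw [hmx_eq, hmn_eq]
      rw [hnodup_iff]
      rw [hlen]
      exact ⟨fun h => h.2, fun h => ⟨hnil, h⟩⟩
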